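-- pv_equiv track=rewrite | github.com/tiziocastagna/verbavolant | webscraper.py | add_spelling_options
-- ===== SOURCE A (Python) =====
-- def join_strings(strings):
--     result = ""
--     for string in strings:
--         result += string
--     return result
--
-- def separate_parts(verb):
--     if ", " in verb:
--         words = []
--         options = []
--         last_index = 0
--         for i in range(1, len(verb)):
--             if verb[i] == ",":
--                 options.append(verb[last_index:i])
--                 last_index = i + 1
--             elif verb[i] == " " and verb[i - 1] != ",":
--                 words.append(verb[last_index:i])
--                 last_index = i
--         options.append(verb[last_index:])
--
--         base_verb = join_strings(words)
--
--         results = []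
--         for option in options:
--             results.append(base_verb + option)
--         return results
--     else:
--         return [verb]
--
-- def add_spelling_options(verb):
--     results = []
--     verb_parts = separate_parts(verb)
--     for verb_part in verb_parts:
--         if verb_part[:7] == "lui/lei":
--             if verb_part[-3:] == "o/a":
--                 results.append("lui" + verb_part[7:-3] + "o")
--                 results.append("lei" + verb_part[7:-3] + "a")
--                 results.append("egli" + verb_part[7:-3] + "o")
--             else:
--                 results.append("lui" + verb_part[7:])
--                 results.append("lei" + verb_part[7:])
--                 if verb_part[-1] == "a":
--                     results.append("egli" + verb_part[7:-1] + "o")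
--                 else:
--                     results.append("egli" + verb_part[7:])
--         elif verb_part[:11] == "che lui/lei":
--             if verb_part[-3:] == "o/a":
--                 results.append("che lui" + verb_part[11:-3] + "o")
--                 results.append("che lei" + verb_part[11:-3] + "a")
--                 results.append("che egli" + verb_part[11:-3] + "o")
--             else:
--                 results.append("che lui" + verb_part[11:])
--                 results.append("che lei" + verb_part[11:])
--                 if verb_part[-1] == "a":
--                     results.append("che egli" + verb_part[11:-1] + "o")
--                 else:
--                     results.append("che egli" + verb_part[11:])
--         elif verb_part[:4] == "loro":
--             if verb_part[-3:] == "i/e":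
--                 results.append(verb_part[:-3] + "i")
--                 results.append(verb_part[:-3] + "e")
--                 results.append("essi" + verb_part[4:-3] + "i")
--             else:
--                 results.append(verb_part)
--                 results.append("essi" + verb_part[4:])
--         elif verb_part[:8] == "che loro":
--             if verb_part[-3:] == "i/e":
--                 results.append(verb_part[:-3] + "i")
--                 results.append(verb_part[:-3] + "e")
--                 results.append("che essi" + verb_part[8:-3] + "i")
--             else:
--                 results.append(verb_part)
--                 results.append("che essi" + verb_part[8:])
--         elif verb_part[-3:] == "o/a":
--             results.append(verb_part[:-3] + "o")
--             results.append(verb_part[:-3] + "a")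
--         elif verb_part[-3:] == "i/e":
--             results.append(verb_part[:-3] + "i")
--             results.append(verb_part[:-3] + "e")
--         else:
--             results.append(verb_part)
--     return results
-- ===== SOURCE B (Python) =====
-- def separate_parts(verb):
--     # single left-to-right fold carrying the current segment, instead of index slicing
--     if ", " not in verb:
--         return [verb]
--     words = []
--     options = []
--     cur = verb[:1]
--     prev = verb[:1]
--     for c in verb[1:]:
--         if c == ',':
--             options.append(cur)
--             cur = ''
--         elif c == ' ' and prev != ',':
--             words.append(cur)
--             cur = ' '
--         else:
--             cur += c
--         prev = c
--     options.append(cur)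
--     base = ''.join(words)
--     return [base + o for o in options]
--
-- def _variants(part):
--     # pure per-part expansion: strip an optional 'che ' prefix, dispatch once per stem,
--     # and return the variant list instead of appending to a shared accumulator
--     if part.startswith('che '):
--         pre, core = 'che ', part[4:]
--     else:
--         pre, core = '', part
--     if core.startswith('lui/lei'):
--         rest = core[7:]
--         if core.endswith('o/a'):
--             mid = rest[:-3]
--             return [pre + 'lui' + mid + 'o', pre + 'lei' + mid + 'a', pre + 'egli' + mid + 'o']
--         third = pre + 'egli' + (rest[:-1] + 'o' if core.endswith('a') else rest)
--         return [pre + 'lui' + rest, pre + 'lei' + rest, third]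
--     if core.startswith('loro'):
--         rest = core[4:]
--         if core.endswith('i/e'):
--             mid = rest[:-3]
--             return [pre + core[:-3] + 'i', pre + core[:-3] + 'e', pre + 'essi' + mid + 'i']
--         return [part, pre + 'essi' + rest]
--     if part.endswith('o/a'):
--         return [part[:-3] + 'o', part[:-3] + 'a']
--     if part.endswith('i/e'):
--         return [part[:-3] + 'i', part[:-3] + 'e']
--     return [part]
--
-- def add_spelling_options(verb):
--     return [v for part in separate_parts(verb) for v in _variants(part)]
-- ===== Notes on version B (the rewrite author's own statement) =====
-- stated objective: simpler
-- what changed: separate_parts is rewritten as a single left-to-right fold carrying the current segment (instead of an index loop with slicing), and the variant generation becomes a pure per-part function that strips the optional 'che ' prefix once and dispatches on the pronoun stem, returning its list of variants which are flat-mapped over the parts instead of appended to a shared accumulator across four duplicated pronoun branches.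
import Mathlib
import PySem

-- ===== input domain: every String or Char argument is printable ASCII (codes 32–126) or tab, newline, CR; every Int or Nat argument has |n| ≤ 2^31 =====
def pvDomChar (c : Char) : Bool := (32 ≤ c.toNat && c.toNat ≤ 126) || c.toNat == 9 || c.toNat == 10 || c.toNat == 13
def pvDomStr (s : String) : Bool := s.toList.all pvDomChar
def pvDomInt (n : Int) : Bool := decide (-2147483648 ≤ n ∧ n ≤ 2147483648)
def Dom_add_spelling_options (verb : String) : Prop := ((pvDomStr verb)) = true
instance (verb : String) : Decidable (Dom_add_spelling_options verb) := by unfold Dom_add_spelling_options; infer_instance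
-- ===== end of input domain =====

-- B restructures A: separate_parts becomes a single left-to-right fold carrying the current
-- segment (instead of index slicing), and the variant generation becomes a pure per-part
-- function (optional che-prefix stripped once, one dispatch per stem) flat-mapped over the
-- parts instead of four duplicated branches appending to a shared accumulator (objective: simpler).

-- ===== PORT A =====
-- join_strings
def pvJoinStrings (strings : List (List Char)) : List Char :=
  strings.foldl (fun result s => result ++ s) []

-- the body of A's scanning for-loop in separate_parts (state: words, options, last_index)
-- verb[i] / verb[i-1] are read with pyGetD: every index the loop reaches is in range
def pvFA (verb : List Char) (st : List (List Char) × List (List Char) × Int) (i : Int) :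
    List (List Char) × List (List Char) × Int :=
  if PySem.List.pyGetD verb i ' ' = ',' then
    (st.1, st.2.1 ++ [PySem.List.slice verb (some st.2.2) (some i)], i + 1)
  else if PySem.List.pyGetD verb i ' ' = ' ' ∧ PySem.List.pyGetD verb (i - 1) ' ' ≠ ',' then
    (st.1 ++ [PySem.List.slice verb (some st.2.2) (some i)], st.2.1, i)
  else st

-- separate_parts
def pvSeparatePartsA (verb : List Char) : List (List Char) :=
  if PySem.Chars.isIn ", ".toList verb then
    let st := (PySem.List.pyRange 1 (verb.length : Int)).foldl (pvFA verb) ([], [], 0)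
    let options := st.2.1 ++ [PySem.List.slice verb (some st.2.2) none]
    let base := pvJoinStrings st.1
    options.foldl (fun results option => results ++ [base ++ option]) []
  else [verb]

-- the body of A's for-loop over verb_parts
def pvStepA (results : List (List Char)) (verb_part : List Char) : List (List Char) :=
  if PySem.List.slice verb_part none (some 7) = "lui/lei".toList then
    if PySem.List.slice verb_part (some (-3)) none = "o/a".toList then
      results ++ ["lui".toList ++ PySem.List.slice verb_part (some 7) (some (-3)) ++ "o".toList,
                  "lei".toList ++ PySem.List.slice verb_part (some 7) (some (-3)) ++ "a".toList,
                  "egli".toList ++ PySem.List.slice verb_part (some 7) (some (-3)) ++ "o".toList]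
    else
      let r := results ++ ["lui".toList ++ PySem.List.slice verb_part (some 7) none,
                           "lei".toList ++ PySem.List.slice verb_part (some 7) none]
      if PySem.List.pyGet? verb_part (-1) = some 'a' then
        r ++ ["egli".toList ++ PySem.List.slice verb_part (some 7) (some (-1)) ++ "o".toList]
      else
        r ++ ["egli".toList ++ PySem.List.slice verb_part (some 7) none]
  else if PySem.List.slice verb_part none (some 11) = "che lui/lei".toList then
    if PySem.List.slice verb_part (some (-3)) none = "o/a".toList then
      results ++ ["che lui".toList ++ PySem.List.slice verb_part (some 11) (some (-3)) ++ "o".toList,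
                  "che lei".toList ++ PySem.List.slice verb_part (some 11) (some (-3)) ++ "a".toList,
                  "che egli".toList ++ PySem.List.slice verb_part (some 11) (some (-3)) ++ "o".toList]
    else
      let r := results ++ ["che lui".toList ++ PySem.List.slice verb_part (some 11) none,
                           "che lei".toList ++ PySem.List.slice verb_part (some 11) none]
      if PySem.List.pyGet? verb_part (-1) = some 'a' then
        r ++ ["che egli".toList ++ PySem.List.slice verb_part (some 11) (some (-1)) ++ "o".toList]
      else
        r ++ ["che egli".toList ++ PySem.List.slice verb_part (some 11) none]
  else if PySem.List.slice verb_part none (some 4) = "loro".toList then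
    if PySem.List.slice verb_part (some (-3)) none = "i/e".toList then
      results ++ [PySem.List.slice verb_part none (some (-3)) ++ "i".toList,
                  PySem.List.slice verb_part none (some (-3)) ++ "e".toList,
                  "essi".toList ++ PySem.List.slice verb_part (some 4) (some (-3)) ++ "i".toList]
    else
      results ++ [verb_part, "essi".toList ++ PySem.List.slice verb_part (some 4) none]
  else if PySem.List.slice verb_part none (some 8) = "che loro".toList then
    if PySem.List.slice verb_part (some (-3)) none = "i/e".toList then
      results ++ [PySem.List.slice verb_part none (some (-3)) ++ "i".toList,
                  PySem.List.slice verb_part none (some (-3)) ++ "e".toList,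
                  "che essi".toList ++ PySem.List.slice verb_part (some 8) (some (-3)) ++ "i".toList]
    else
      results ++ [verb_part, "che essi".toList ++ PySem.List.slice verb_part (some 8) none]
  else if PySem.List.slice verb_part (some (-3)) none = "o/a".toList then
    results ++ [PySem.List.slice verb_part none (some (-3)) ++ "o".toList,
                PySem.List.slice verb_part none (some (-3)) ++ "a".toList]
  else if PySem.List.slice verb_part (some (-3)) none = "i/e".toList then
    results ++ [PySem.List.slice verb_part none (some (-3)) ++ "i".toList,
                PySem.List.slice verb_part none (some (-3)) ++ "e".toList]
  else
    results ++ [verb_part]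

def add_spelling_options (verb : String) : List String :=
  ((pvSeparatePartsA verb.toList).foldl pvStepA []).map String.ofList

-- ===== PORT B =====
-- the body of B's fold in separate_parts (state: words, options, cur, prev)
def pvFB (st : List (List Char) × List (List Char) × List Char × Char) (c : Char) :
    List (List Char) × List (List Char) × List Char × Char :=
  if c = ',' then (st.1, st.2.1 ++ [st.2.2.1], [], c)
  else if c = ' ' ∧ st.2.2.2 ≠ ',' then (st.1 ++ [st.2.2.1], st.2.1, [' '], c)
  else (st.1, st.2.1, st.2.2.1 ++ [c], c)

-- B's separate_parts: one fold carrying the current segment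
def pvSeparatePartsB (verb : List Char) : List (List Char) :=
  if PySem.Chars.isIn ", ".toList verb then
    match verb with
    | [] => [verb]   -- unreachable: ", " in verb means verb is nonempty
    | v0 :: rest =>
      let st := rest.foldl pvFB ([], [], [v0], v0)
      let options := st.2.1 ++ [st.2.2.1]
      let base := PySem.Chars.join [] st.1
      options.map (fun o => base ++ o)
  else [verb]

-- B's _variants: strip the optional che-prefix, dispatch once per stem, return the list
-- (nonnegative Python slices core[7:], rest[:-3], … are exactly List.drop / List.take)
def pvVariants (part : List Char) : List (List Char) :=
  let pc : List Char × List Char :=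
    if PySem.Chars.startswith part "che ".toList = true then ("che ".toList, part.drop 4)
    else ([], part)
  if PySem.Chars.startswith pc.2 "lui/lei".toList = true then
    let rest := pc.2.drop 7
    if PySem.Chars.endswith pc.2 "o/a".toList = true then
      let mid := rest.take (rest.length - 3)
      [pc.1 ++ "lui".toList ++ mid ++ "o".toList,
       pc.1 ++ "lei".toList ++ mid ++ "a".toList,
       pc.1 ++ "egli".toList ++ mid ++ "o".toList]
    else
      let third := pc.1 ++ "egli".toList ++
        (if PySem.Chars.endswith pc.2 "a".toList = true then
           rest.take (rest.length - 1) ++ "o".toList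
         else rest)
      [pc.1 ++ "lui".toList ++ rest, pc.1 ++ "lei".toList ++ rest, third]
  else if PySem.Chars.startswith pc.2 "loro".toList = true then
    let rest := pc.2.drop 4
    if PySem.Chars.endswith pc.2 "i/e".toList = true then
      let mid := rest.take (rest.length - 3)
      [pc.1 ++ pc.2.take (pc.2.length - 3) ++ "i".toList,
       pc.1 ++ pc.2.take (pc.2.length - 3) ++ "e".toList,
       pc.1 ++ "essi".toList ++ mid ++ "i".toList]
    else [part, pc.1 ++ "essi".toList ++ rest]
  else if PySem.Chars.endswith part "o/a".toList = true then
    [part.take (part.length - 3) ++ "o".toList, part.take (part.length - 3) ++ "a".toList]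
  else if PySem.Chars.endswith part "i/e".toList = true then
    [part.take (part.length - 3) ++ "i".toList, part.take (part.length - 3) ++ "e".toList]
  else [part]

def add_spelling_options_alt (verb : String) : List String :=
  ((pvSeparatePartsB verb.toList).flatMap pvVariants).map String.ofList

-- ===== PRECONDITION & SPEC =====
def Spec_add_spelling_options (verb : String) (out : List String) : Prop := out = add_spelling_options_alt verb
instance (verb : String) (out : List String) : Decidable (Spec_add_spelling_options verb out) := by unfold Spec_add_spelling_options; infer_instance

-- ===== CLAIM (what is proved, stated in full; the proofs are below) =====
def Claim_equal_add_spelling_options : Prop := ∀ (verb : String), Dom_add_spelling_options verb → Spec_add_spelling_options verb (add_spelling_options verb)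

-- ===== LEMMAS AND PROOFS =====

lemma pvJoinFlat (ws : List (List Char)) : PySem.Chars.join [] ws = ws.flatten := by
  induction ws with
  | nil => rfl
  | cons w ws ih =>
    cases ws with
    | nil => simp [PySem.Chars.join_singleton]
    | cons w' t =>
      rw [PySem.Chars.join_cons_cons]
      simp only [List.flatten_cons]
      simp [ih]

lemma pvJoinStrings_eq (ws : List (List Char)) : pvJoinStrings ws = PySem.Chars.join [] ws := by
  unfold pvJoinStrings
  rw [pvJoinFlat]
  have h := PySem.List.foldl_append_eq_flatMap (fun s : List Char => s) ws []
  simpa using h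

-- the two separate_parts loops agree: invariant relating A's (words, options, last_index)
-- to B's (words, options, cur, prev) after processing any prefix of the scanned tail
lemma pvLoopInv (v0 : Char) (pref : List Char) :
    ∀ suff : List Char, ∃ (w o : List (List Char)) (k : Nat),
      k ≤ 1 + pref.length ∧
      (PySem.List.pyRange 1 ((1 + pref.length : Nat) : Int)).foldl
        (pvFA (v0 :: (pref ++ suff))) ([], [], 0) = (w, o, (k : Int)) ∧
      pref.foldl pvFB ([], [], [v0], v0)
        = (w, o, ((v0 :: (pref ++ suff)).drop k).take (1 + pref.length - k), pref.getLastD v0) := by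
  induction pref using List.reverseRecOn with
  | nil =>
    intro suff
    refine ⟨[], [], 0, by omega, ?_, ?_⟩
    · have h1 : ((1 + ([] : List Char).length : Nat) : Int) = 1 := by simp
      rw [h1, show PySem.List.pyRange 1 1 = [] from by decide]
      rfl
    · simp
  | append_singleton pref c ih =>
    intro suff
    obtain ⟨w, o, k, hk, hA, hB⟩ := ih (c :: suff)
    have hlist : v0 :: ((pref ++ [c]) ++ suff) = v0 :: (pref ++ (c :: suff)) := by simp
    have hsplit : v0 :: (pref ++ (c :: suff)) = (v0 :: pref) ++ (c :: suff) := by simp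
    have hlm : (v0 :: (pref ++ (c :: suff)))[1 + pref.length]? = some c := by
      rw [hsplit, List.getElem?_append_right (by simp only [List.length_cons]; omega)]
      have h0 : 1 + pref.length - (v0 :: pref).length = 0 := by
        simp only [List.length_cons]
        omega
      rw [h0]
      rfl
    have hgm : (v0 :: (pref ++ (c :: suff))).getD (1 + pref.length) ' ' = c := by
      rw [List.getD_eq_getElem?_getD, hlm]
      rfl
    have hgprev : (v0 :: (pref ++ (c :: suff))).getD pref.length ' ' = pref.getLastD v0 := by
      rw [List.getD_eq_getElem?_getD, hsplit,
        List.getElem?_append_left (by simp only [List.length_cons]; omega)]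
      have h1 : (v0 :: pref)[pref.length]? = (v0 :: pref).getLast? := by
        rw [List.getLast?_eq_getElem?]
        congr 1
      rw [h1, List.getLast?_cons]
      simp [List.getLastD_eq_getLast?]
    have hm1 : ((1 + (pref ++ [c]).length : Nat) : Int) = ((1 + pref.length : Nat) : Int) + 1 := by
      simp only [List.length_append, List.length_cons, List.length_nil]
      push_cast
      ring
    rw [hlist, hm1,
      PySem.List.pyRange_one_succ_right (by exact_mod_cast Nat.le_add_right 1 pref.length),
      List.foldl_append, hA, List.foldl_append, hB]
    simp only [List.foldl_cons, List.foldl_nil]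
    unfold pvFA pvFB
    rw [PySem.List.pyGetD_natCast, hgm,
      show ((1 + pref.length : Nat) : Int) - 1 = ((pref.length : Nat) : Int) by push_cast; ring,
      PySem.List.pyGetD_natCast, hgprev]
    by_cases hc : c = ','
    · refine ⟨w, o ++ [PySem.List.slice (v0 :: (pref ++ (c :: suff))) (some (k : Int))
          (some ((1 + pref.length : Nat) : Int))], 2 + pref.length,
        by simp only [List.length_append, List.length_cons, List.length_nil]; omega, ?_, ?_⟩
      · rw [if_pos hc]
        simp only [Prod.mk.injEq, true_and]
        push_cast
        ring
      · rw [if_pos hc]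
        simp only [Prod.mk.injEq, true_and]
        refine ⟨?_, ?_, ?_⟩
        · rw [PySem.List.slice_natCast]
        · have h0 : 1 + (pref ++ [c]).length - (2 + pref.length) = 0 := by
            simp only [List.length_append, List.length_cons, List.length_nil]
            omega
          rw [h0, List.take_zero]
        · rw [List.getLastD_concat]
    · by_cases hsp : c = ' ' ∧ pref.getLastD v0 ≠ ','
      · refine ⟨w ++ [PySem.List.slice (v0 :: (pref ++ (c :: suff))) (some (k : Int))
            (some ((1 + pref.length : Nat) : Int))], o, 1 + pref.length,
          by simp only [List.length_append, List.length_cons, List.length_nil]; omega, ?_, ?_⟩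
        · rw [if_neg hc, if_pos hsp]
        · rw [if_neg hc, if_pos hsp]
          simp only [Prod.mk.injEq, true_and]
          refine ⟨?_, ?_, ?_⟩
          · rw [PySem.List.slice_natCast]
          · have hd : (v0 :: (pref ++ (c :: suff))).drop (1 + pref.length) = c :: suff := by
              rw [hsplit, show 1 + pref.length = (v0 :: pref).length from by
                  simp only [List.length_cons]; omega, List.drop_left]
            have h1 : 1 + (pref ++ [c]).length - (1 + pref.length) = 1 := by
              simp only [List.length_append, List.length_cons, List.length_nil]
              omega
            rw [hd, h1, hsp.1]
            simp
          · rw [List.getLastD_concat]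
      · refine ⟨w, o, k,
          by simp only [List.length_append, List.length_cons, List.length_nil]; omega, ?_, ?_⟩
        · rw [if_neg hc, if_neg hsp]
        · rw [if_neg hc, if_neg hsp]
          simp only [Prod.mk.injEq, true_and]
          refine ⟨?_, ?_⟩
          · have h1 : 1 + (pref ++ [c]).length - k = ((1 + pref.length) - k) + 1 := by
              simp only [List.length_append, List.length_cons, List.length_nil]
              omega
            rw [h1, List.take_add_one]
            congr 1
            have h2 : ((v0 :: (pref ++ (c :: suff))).drop k)[(1 + pref.length) - k]? = some c := by
              rw [List.getElem?_drop,
                show k + (1 + pref.length - k) = 1 + pref.length from by omega, hlm]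
            rw [h2]
            rfl
          · rw [List.getLastD_concat]

lemma pvSep_eq (l : List Char) : pvSeparatePartsA l = pvSeparatePartsB l := by
  by_cases hin : PySem.Chars.isIn ", ".toList l = true
  · cases l with
    | nil => revert hin; decide
    | cons v0 rest =>
      obtain ⟨w, o, k, hk, hA, hB⟩ := pvLoopInv v0 rest []
      rw [List.append_nil] at hA hB
      simp only [pvSeparatePartsA, pvSeparatePartsB]
      rw [if_pos hin, if_pos hin]
      rw [show (((v0 :: rest).length : Nat) : Int) = ((1 + rest.length : Nat) : Int) from by
          simp only [List.length_cons]; push_cast; ring,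
        hA, hB]
      have hcur : ((v0 :: rest).drop k).take (1 + rest.length - k) = (v0 :: rest).drop k := by
        apply List.take_of_length_le
        simp only [List.length_drop, List.length_cons]
        omega
      have hslice : PySem.List.slice (v0 :: rest) (some (k : Int)) none = (v0 :: rest).drop k := by
        rw [PySem.List.slice_from _ (by positivity)]
        simp
      rw [hcur, hslice, pvJoinStrings_eq]
      rw [PySem.List.foldl_append_singleton_eq_map
        (fun option => PySem.Chars.join [] w ++ option)]
      simp
  · simp only [pvSeparatePartsA, pvSeparatePartsB]
    rw [if_neg hin, if_neg hin]

-- literal bridges (definitional)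
lemma pvLche : "che ".toList = ['c','h','e',' '] := rfl
lemma pvLA : "a".toList = ['a'] := rfl

-- slice normalizations for the literal indices A uses
lemma pvTakeM3 (xs : List Char) : PySem.List.slice xs none (some (-3)) = xs.take (xs.length - 3) := by
  simp [PySem.List.slice]
lemma pvDropM3 (xs : List Char) : PySem.List.slice xs (some (-3)) none = xs.drop (xs.length - 3) := by
  simp [PySem.List.slice]
lemma pvDrop4 (xs : List Char) (h : 4 ≤ xs.length) : PySem.List.slice xs (some 4) none = xs.drop 4 := by
  simp [PySem.List.slice, Nat.min_eq_left h]
lemma pvDrop7 (xs : List Char) (h : 7 ≤ xs.length) : PySem.List.slice xs (some 7) none = xs.drop 7 := by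
  simp [PySem.List.slice, Nat.min_eq_left h]
lemma pvDrop8 (xs : List Char) (h : 8 ≤ xs.length) : PySem.List.slice xs (some 8) none = xs.drop 8 := by
  simp [PySem.List.slice, Nat.min_eq_left h]
lemma pvDrop11 (xs : List Char) (h : 11 ≤ xs.length) : PySem.List.slice xs (some 11) none = xs.drop 11 := by
  simp [PySem.List.slice, Nat.min_eq_left h]
lemma pvMid7m3 (xs : List Char) (h : 7 ≤ xs.length) :
    PySem.List.slice xs (some 7) (some (-3)) = (xs.drop 7).take (xs.length - 3 - 7) := by
  simp [PySem.List.slice, Nat.min_eq_left h]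
lemma pvMid7m1 (xs : List Char) (h : 7 ≤ xs.length) :
    PySem.List.slice xs (some 7) (some (-1)) = (xs.drop 7).take (xs.length - 1 - 7) := by
  simp [PySem.List.slice, Nat.min_eq_left h]
lemma pvMid11m3 (xs : List Char) (h : 11 ≤ xs.length) :
    PySem.List.slice xs (some 11) (some (-3)) = (xs.drop 11).take (xs.length - 3 - 11) := by
  simp [PySem.List.slice, Nat.min_eq_left h]
lemma pvMid11m1 (xs : List Char) (h : 11 ≤ xs.length) :
    PySem.List.slice xs (some 11) (some (-1)) = (xs.drop 11).take (xs.length - 1 - 11) := by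
  simp [PySem.List.slice, Nat.min_eq_left h]
lemma pvMid4m3 (xs : List Char) (h : 4 ≤ xs.length) :
    PySem.List.slice xs (some 4) (some (-3)) = (xs.drop 4).take (xs.length - 3 - 4) := by
  simp [PySem.List.slice, Nat.min_eq_left h]
lemma pvMid8m3 (xs : List Char) (h : 8 ≤ xs.length) :
    PySem.List.slice xs (some 8) (some (-3)) = (xs.drop 8).take (xs.length - 3 - 8) := by
  simp [PySem.List.slice, Nat.min_eq_left h]

-- A's slice-equality conditions are B's startswith / endswith conditions
lemma pvSliceTakeLit (xs lit : List Char) (b : Int) (hb : 0 ≤ b) (hlen : lit.length = b.toNat) :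
    (PySem.List.slice xs none (some b) = lit) ↔ PySem.Chars.startswith xs lit = true := by
  rw [PySem.List.slice_to xs hb, PySem.Chars.startswith_iff, List.prefix_iff_eq_take, hlen]
  exact eq_comm
lemma pvSliceDropLit (xs lit : List Char) (hlen : lit.length = 3) :
    (PySem.List.slice xs (some (-3)) none = lit) ↔ PySem.Chars.endswith xs lit = true := by
  rw [pvDropM3, PySem.Chars.endswith_iff, List.suffix_iff_eq_drop, hlen]
  exact eq_comm

-- verb_part[-1] == 'a'  is  endswith "a"  on a nonempty list
lemma pvLast (xs : List Char) (h : xs ≠ []) :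
    (PySem.List.pyGet? xs (-1) = some 'a') ↔ PySem.Chars.endswith xs "a".toList = true := by
  obtain ⟨ys, z, rfl⟩ := (List.eq_nil_or_concat xs).resolve_left h
  rw [List.concat_eq_append]
  have h1 : PySem.List.pyGet? (ys ++ [z]) (-1) = some z := by
    simp [PySem.List.pyGet?, PySem.List.pyIdx?]
  rw [h1, PySem.Chars.endswith_iff, List.suffix_iff_eq_drop, pvLA]
  have h2 : (ys ++ [z]).length - (['a'] : List Char).length = ys.length := by simp
  rw [h2, List.drop_left]
  simp [eq_comm]

-- suffix tests go through the four-character che-prefix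
lemma pvEnds4 (core lit : List Char) (h : lit.length ≤ core.length) :
    (PySem.Chars.endswith ("che ".toList ++ core) lit = true) ↔
      PySem.Chars.endswith core lit = true := by
  rw [PySem.Chars.endswith_iff, PySem.Chars.endswith_iff]
  constructor
  · intro hs
    rw [List.suffix_iff_eq_drop] at hs
    rw [List.drop_append,
        List.drop_of_length_le (show ("che ".toList).length ≤ ("che ".toList ++ core).length - lit.length by
          simp [pvLche]; omega),
        List.nil_append] at hs
    have harith : ("che ".toList ++ core).length - lit.length - ("che ".toList).length
        = core.length - lit.length := by
      simp [pvLche]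
      omega
    rw [harith] at hs
    rw [List.suffix_iff_eq_drop]
    exact hs
  · intro hs
    exact hs.trans (List.suffix_append _ _)

lemma pvDropChe (core : List Char) (a b : Nat) (hab : a = b + 4) :
    List.drop a ("che ".toList ++ core) = List.drop b core := by
  subst hab
  rw [List.drop_append, List.drop_of_length_le (show ("che ".toList).length ≤ b + 4 by simp [pvLche])]
  simp [pvLche]

lemma pvTakeChe (core : List Char) (a b : Nat) (hab : a = b + 4) :
    List.take a ("che ".toList ++ core) = "che ".toList ++ List.take b core := by
  subst hab
  rw [List.take_append, List.take_of_length_le (show ("che ".toList).length ≤ b + 4 by simp [pvLche])]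
  simp [pvLche]

-- Nat subtraction commutes, to match B's drop-then-take arithmetic with A's slice bounds
lemma pvSubComm (a b c : Nat) : a - b - c = a - c - b := by omega

-- A's loop body appends exactly B's per-part variant list
lemma pvStepA_var (res : List (List Char)) (p : List Char) :
    pvStepA res p = res ++ pvVariants p := by
  have e1 := pvSliceTakeLit p "lui/lei".toList 7 (by norm_num) (by decide)
  have e2 := pvSliceTakeLit p "che lui/lei".toList 11 (by norm_num) (by decide)
  have e3 := pvSliceTakeLit p "loro".toList 4 (by norm_num) (by decide)
  have e4 := pvSliceTakeLit p "che loro".toList 8 (by norm_num) (by decide)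
  have f1 := pvSliceDropLit p "o/a".toList (by decide)
  have f2 := pvSliceDropLit p "i/e".toList (by decide)
  by_cases hche : PySem.Chars.startswith p "che ".toList = true
  · -- part starts with "che "
    obtain ⟨core, rfl⟩ := (PySem.Chars.startswith_iff _ _).mp hche
    have hlen : ("che ".toList ++ core).length = 4 + core.length := by
      simp [pvLche]
      omega
    have g1 : ¬ PySem.Chars.startswith ("che ".toList ++ core) "lui/lei".toList = true := by
      simp [PySem.Chars.startswith_iff, pvLche, List.cons_prefix_cons]
    have g3 : ¬ PySem.Chars.startswith ("che ".toList ++ core) "loro".toList = true := by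
      simp [PySem.Chars.startswith_iff, pvLche, List.cons_prefix_cons]
    have g2 : (PySem.Chars.startswith ("che ".toList ++ core) "che lui/lei".toList = true) ↔
        PySem.Chars.startswith core "lui/lei".toList = true := by
      simp [PySem.Chars.startswith_iff, pvLche, List.cons_prefix_cons]
    have g4 : (PySem.Chars.startswith ("che ".toList ++ core) "che loro".toList = true) ↔
        PySem.Chars.startswith core "loro".toList = true := by
      simp [PySem.Chars.startswith_iff, pvLche, List.cons_prefix_cons]
    have hcore : ("che ".toList ++ core).drop 4 = core := by
      have := pvDropChe core 4 0 rfl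
      simpa using this
    by_cases hL : PySem.Chars.startswith core "lui/lei".toList = true
    · have h7 : 7 ≤ core.length := by
        have := ((PySem.Chars.startswith_iff _ _).mp hL).length_le
        simpa using this
      have hne : ("che ".toList ++ core) ≠ [] := by simp [pvLche]
      have hlast : (PySem.List.pyGet? ("che ".toList ++ core) (-1) = some 'a') ↔
          PySem.Chars.endswith core "a".toList = true := by
        rw [pvLast _ hne, pvEnds4 core "a".toList (by show 1 ≤ core.length; omega)]
      have hOA : (PySem.Chars.endswith ("che ".toList ++ core) "o/a".toList = true) ↔
          PySem.Chars.endswith core "o/a".toList = true :=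
        pvEnds4 core _ (by show 3 ≤ core.length; omega)
      have v1 : PySem.List.slice ("che ".toList ++ core) (some 11) (some (-3)) =
          (core.drop 7).take ((core.drop 7).length - 3) := by
        rw [pvMid11m3 _ (by omega), hlen, pvDropChe core 11 7 rfl, List.length_drop, pvSubComm]
        congr 1
        omega
      have v2 : PySem.List.slice ("che ".toList ++ core) (some 11) none = core.drop 7 := by
        rw [pvDrop11 _ (by omega), pvDropChe core 11 7 rfl]
      have v3 : PySem.List.slice ("che ".toList ++ core) (some 11) (some (-1)) =
          (core.drop 7).take ((core.drop 7).length - 1) := by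
        rw [pvMid11m1 _ (by omega), hlen, pvDropChe core 11 7 rfl, List.length_drop, pvSubComm]
        congr 1
        omega
      simp only [pvStepA, pvVariants, e1, e2, e3, e4, f1, f2, hlast]
      simp at hche hcore g1 g2 hL hOA v1 v2 v3
      simp [hche, hcore, g1, g2, hL, hOA, v1, v2, v3, List.append_assoc]
      split_ifs <;> simp [List.append_assoc]
    · by_cases hR : PySem.Chars.startswith core "loro".toList = true
      · have h4 : 4 ≤ core.length := by
          have := ((PySem.Chars.startswith_iff _ _).mp hR).length_le
          simpa using this
        have hIE : (PySem.Chars.endswith ("che ".toList ++ core) "i/e".toList = true) ↔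
            PySem.Chars.endswith core "i/e".toList = true :=
          pvEnds4 core _ (by show 3 ≤ core.length; omega)
        have v4 : PySem.List.slice ("che ".toList ++ core) none (some (-3)) =
            "che ".toList ++ core.take (core.length - 3) := by
          rw [pvTakeM3, hlen, pvTakeChe core (4 + core.length - 3) (core.length - 3) (by omega)]
        have v5 : PySem.List.slice ("che ".toList ++ core) (some 8) (some (-3)) =
            (core.drop 4).take ((core.drop 4).length - 3) := by
          rw [pvMid8m3 _ (by omega), hlen, pvDropChe core 8 4 rfl, List.length_drop, pvSubComm]
          congr 1
          omega
        have v6 : PySem.List.slice ("che ".toList ++ core) (some 8) none = core.drop 4 := by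
          rw [pvDrop8 _ (by omega), pvDropChe core 8 4 rfl]
        simp only [pvStepA, pvVariants, e1, e2, e3, e4, f1, f2]
        simp at hche hcore g1 g2 g3 g4 hL hR hIE v4 v5 v6
        simp [hche, hcore, g1, g2, g3, g4, hL, hR, hIE, v4, v5, v6, List.append_assoc]
        split_ifs <;> simp [List.append_assoc]
      · simp only [pvStepA, pvVariants, e1, e2, e3, e4, f1, f2, pvTakeM3]
        simp at hche hcore g1 g2 g3 g4 hL hR
        simp [hche, hcore, g1, g2, g3, g4, hL, hR]
        split_ifs <;> simp [List.append_assoc]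
  · -- no "che " prefix
    have h2 : ¬ PySem.Chars.startswith p "che lui/lei".toList = true := by
      intro h
      exact hche ((PySem.Chars.startswith_iff _ _).mpr
        (List.IsPrefix.trans (by decide) ((PySem.Chars.startswith_iff _ _).mp h)))
    have h4 : ¬ PySem.Chars.startswith p "che loro".toList = true := by
      intro h
      exact hche ((PySem.Chars.startswith_iff _ _).mpr
        (List.IsPrefix.trans (by decide) ((PySem.Chars.startswith_iff _ _).mp h)))
    by_cases h1 : PySem.Chars.startswith p "lui/lei".toList = true
    · have hne : p ≠ [] := by
        intro hnil
        rw [hnil] at h1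
        revert h1
        decide
      have h7 : 7 ≤ p.length := by
        have := ((PySem.Chars.startswith_iff _ _).mp h1).length_le
        simpa using this
      have hlast := pvLast p hne
      have w1 : PySem.List.slice p (some 7) (some (-3)) =
          (p.drop 7).take ((p.drop 7).length - 3) := by
        rw [pvMid7m3 _ h7, List.length_drop, pvSubComm]
      have w2 : PySem.List.slice p (some 7) none = p.drop 7 := pvDrop7 _ h7
      have w3 : PySem.List.slice p (some 7) (some (-1)) =
          (p.drop 7).take ((p.drop 7).length - 1) := by
        rw [pvMid7m1 _ h7, List.length_drop, pvSubComm]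
      simp only [pvStepA, pvVariants, e1, e2, e3, e4, f1, f2, hlast]
      simp at hche h1
      simp [hche, h1, w1, w2, w3, List.append_assoc]
      split_ifs <;> simp [List.append_assoc]
    · by_cases h3 : PySem.Chars.startswith p "loro".toList = true
      · have h4p : 4 ≤ p.length := by
          have := ((PySem.Chars.startswith_iff _ _).mp h3).length_le
          simpa using this
        have w4 : PySem.List.slice p (some 4) (some (-3)) =
            (p.drop 4).take ((p.drop 4).length - 3) := by
          rw [pvMid4m3 _ h4p, List.length_drop, pvSubComm]
        have w5 : PySem.List.slice p (some 4) none = p.drop 4 := pvDrop4 _ h4p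
        simp only [pvStepA, pvVariants, e1, e2, e3, e4, f1, f2, pvTakeM3]
        simp at hche h2 h4 h1 h3
        simp [hche, h2, h4, h1, h3, w4, w5, List.append_assoc]
        split_ifs <;> simp [List.append_assoc]
      · simp only [pvStepA, pvVariants, e1, e2, e3, e4, f1, f2, pvTakeM3]
        simp at hche h2 h4 h1 h3
        simp [hche, h2, h4, h1, h3]
        split_ifs <;> simp [List.append_assoc]

-- folding A's step from any accumulator is appending B's flat-mapped variants
lemma pvFoldVar (parts : List (List Char)) :
    ∀ res, parts.foldl pvStepA res = res ++ parts.flatMap pvVariants := by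
  induction parts with
  | nil => intro res; simp
  | cons p t ih =>
    intro res
    simp only [List.foldl_cons, List.flatMap_cons]
    rw [pvStepA_var, ih, List.append_assoc]

-- ===== VERDICT (by name: the statement is the Claim_ definition above) =====
theorem add_spelling_options_spec : Claim_equal_add_spelling_options := by
  intro verb _
  unfold Spec_add_spelling_options add_spelling_options add_spelling_options_alt
  rw [pvSep_eq, pvFoldVar, List.nil_append]
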